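-- pv_equiv track=rewrite | github.com/justwzhang/Multiclass-Classification | CSE353Hw5Main.py | groupX
-- ===== SOURCE A (Python) =====
-- def groupX(list, stride, pointSize):
--     returnedX = []
--     for i in range(stride):
--         tempXPoint = []
--         for j in range(pointSize):
--             tempXPoint.append(list[i + j*stride])
--         returnedX.append(tempXPoint)
--     return returnedX
-- ===== SOURCE B (Python) =====
-- def groupX(list, stride, pointSize):
--     # Round-robin deal: consume the list once, in order, dropping each
--     # element into the next row; row i ends up with list[i + j*stride].
--     rows = [[] for _ in range(stride)]
--     if not rows:
--         return rows
--     it = iter(list)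
--     for _ in range(pointSize):
--         for row in rows:
--             row.append(next(it))
--     return rows
-- ===== Notes on version B (the rewrite author's own statement) =====
-- stated objective: alternative
-- what changed: B replaces A's per-row strided random-access indexing (nested loops reading list[i+j*stride]) with a single in-order pass over the list that deals elements round-robin into pre-created rows via an iterator.
import Mathlib
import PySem

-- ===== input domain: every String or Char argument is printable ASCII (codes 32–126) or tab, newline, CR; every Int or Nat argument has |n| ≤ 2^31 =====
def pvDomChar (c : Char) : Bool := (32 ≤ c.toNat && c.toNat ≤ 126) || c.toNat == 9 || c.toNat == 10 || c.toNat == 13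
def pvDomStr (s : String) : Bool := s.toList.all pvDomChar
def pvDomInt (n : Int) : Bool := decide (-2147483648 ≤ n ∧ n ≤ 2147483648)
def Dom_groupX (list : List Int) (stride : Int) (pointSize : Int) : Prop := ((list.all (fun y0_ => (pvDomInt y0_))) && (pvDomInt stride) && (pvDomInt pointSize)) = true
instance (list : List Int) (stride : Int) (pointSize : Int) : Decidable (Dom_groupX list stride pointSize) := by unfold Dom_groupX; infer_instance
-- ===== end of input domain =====

-- B deals the list round-robin into rows in one in-order pass, instead of A's strided indexing.
-- Equivalence is about the return value; A raises IndexError (B exhausts its iterator) exactly outside Pre_.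

-- ===== PORT A =====
-- literal port of A: for i in range(stride): for j in range(pointSize): append list[i+j*stride]
-- (.getD 0 is a totality guard: Pre_ guarantees the index is in range, so pyGet? is some)
def groupX (list : List Int) (stride : Int) (pointSize : Int) : List (List Int) :=
  (PySem.List.pyRange 0 stride 1).foldl
    (fun returnedX i =>
      returnedX ++ [(PySem.List.pyRange 0 pointSize 1).foldl
        (fun tempXPoint j => tempXPoint ++ [(PySem.List.pyGet? list (i + j * stride)).getD 0])
        []])
    []

-- ===== PORT B =====
-- literal port of B: rows = [[]]*stride; for _ in range(pointSize): for row in rows: row.append(next(it))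
-- state = (rows rebuilt this round, rows still to serve this round handled via fold, cursor of the iterator);
-- (.getD 0 is a totality guard: Pre_ guarantees the iterator is never exhausted)
def groupX_alt (list : List Int) (stride : Int) (pointSize : Int) : List (List Int) :=
  let init : List (List Int) := (PySem.List.pyRange 0 stride 1).map (fun _ => [])
  if init = [] then init else
  ((PySem.List.pyRange 0 pointSize 1).foldl
    (fun (st : List (List Int) × Int) _ =>
      st.1.foldl
        (fun (acc : List (List Int) × Int) row =>
          (acc.1 ++ [row ++ [(PySem.List.pyGet? list acc.2).getD 0]], acc.2 + 1))
        ([], st.2))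
    (init, 0)).1

-- ===== PRECONDITION & SPEC =====
-- Pre_ excludes exactly the inputs on which the Python A raises IndexError
-- (positive dimensions but fewer than stride*pointSize elements).
def Pre_groupX (list : List Int) (stride : Int) (pointSize : Int) : Prop :=
  stride ≤ 0 ∨ pointSize ≤ 0 ∨ stride * pointSize ≤ list.length
instance (list : List Int) (stride : Int) (pointSize : Int) : Decidable (Pre_groupX list stride pointSize) := by unfold Pre_groupX; infer_instance

def pvWitness_groupX : List Int × Int × Int := ([1, 2, 3, 4, 5, 6], 2, 3)

def Spec_groupX (list : List Int) (stride : Int) (pointSize : Int) (out : List (List Int)) : Prop := out = groupX_alt list stride pointSize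
instance (list : List Int) (stride : Int) (pointSize : Int) (out : List (List Int)) : Decidable (Spec_groupX list stride pointSize out) := by unfold Spec_groupX; infer_instance

-- ===== CLAIM (what is proved, stated in full; the proofs are below) =====
def Claim_equal_groupX : Prop := ∀ (list : List Int) (stride : Int) (pointSize : Int), Dom_groupX list stride pointSize → Pre_groupX list stride pointSize → Spec_groupX list stride pointSize (groupX list stride pointSize)

-- ===== LEMMAS AND PROOFS =====

-- the element both programs read
def pvH (list : List Int) (k : Int) : Int := (PySem.List.pyGet? list k).getD 0

-- fold-append builds a map
theorem pv_foldl_push {α β : Type} (f : α → β) :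
    ∀ (l : List α) (acc : List β),
      l.foldl (fun a x => a ++ [f x]) acc = acc ++ l.map f := by
  intro l
  induction l with
  | nil => intro acc; simp
  | cons x xs ih => intro acc; simp [List.foldl_cons, ih]

-- A's port is the matrix of pvH (i + j*stride)
theorem pv_groupX_eq (list : List Int) (stride : Int) (pointSize : Int) :
    groupX list stride pointSize =
      (PySem.List.pyRange 0 stride 1).map (fun i =>
        (PySem.List.pyRange 0 pointSize 1).map (fun j => pvH list (i + j * stride))) := by
  unfold groupX
  rw [pv_foldl_push]
  simp only [List.nil_append]
  apply List.map_congr_left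
  intro i _
  rw [pv_foldl_push]
  simp [pvH]

-- a fold that ignores its elements is an iterate of the step
theorem pv_foldl_const {α β : Type} (F : β → β) :
    ∀ (l : List α) (init : β), l.foldl (fun st _ => F st) init = F^[l.length] init := by
  intro l
  induction l with
  | nil => intro init; simp
  | cons x xs ih => intro init; simp [List.foldl_cons, ih, Function.iterate_succ_apply]

-- B's inner fold (one round of the deal) on rows of the shape (range m).map f
theorem pv_inner_fold (list : List Int) (m : ℕ) (f : ℕ → List Int) (k0 : Int) :
    ((List.range m).map f).foldl
      (fun (acc : List (List Int) × Int) row =>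
        (acc.1 ++ [row ++ [pvH list acc.2]], acc.2 + 1))
      ([], k0)
    = ((List.range m).map (fun i => f i ++ [pvH list (k0 + (i : Int))]), k0 + (m : Int)) := by
  induction m generalizing f k0 with
  | zero => simp
  | succ n ih =>
    rw [List.range_succ, List.map_append, List.foldl_append, ih]
    simp only [List.map_cons, List.map_nil, List.foldl_cons, List.foldl_nil,
      List.map_append, Prod.mk.injEq]
    refine ⟨by simp, by push_cast; ring⟩

-- B's outer invariant: after t rounds the state is the t-column matrix and the cursor t*s
theorem pv_outer (list : List Int) (s : ℕ) :
    ∀ (t : ℕ),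
      (fun (st : List (List Int) × Int) =>
          st.1.foldl
            (fun (acc : List (List Int) × Int) row =>
              (acc.1 ++ [row ++ [pvH list acc.2]], acc.2 + 1))
            ([], st.2))^[t]
        ((List.range s).map (fun _ => ([] : List Int)), 0)
      = ((List.range s).map (fun (i : ℕ) =>
            (List.range t).map (fun (j : ℕ) => pvH list ((↑(j * s) : Int) + (i : Int)))),
          ((t * s : ℕ) : Int)) := by
  intro t
  induction t with
  | zero => simp
  | succ n ih =>
    rw [Function.iterate_succ_apply', ih]
    simp only
    rw [pv_inner_fold list s (fun (i : ℕ) => (List.range n).map (fun (j : ℕ) => pvH list ((↑(j * s) : Int) + (i : Int)))) ((n * s : ℕ) : Int)]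
    simp only [Prod.mk.injEq]
    constructor
    · apply List.map_congr_left
      intro i _
      rw [List.range_succ]
      simp
    · push_cast; ring

-- B's port is the matrix of pvH (j*stride.toNat + i)
theorem pv_groupX_alt_eq (list : List Int) (stride : Int) (pointSize : Int) :
    groupX_alt list stride pointSize =
      (List.range stride.toNat).map (fun (i : ℕ) =>
        (List.range pointSize.toNat).map (fun (j : ℕ) => pvH list ((↑(j * stride.toNat) : Int) + (i : Int)))) := by
  unfold groupX_alt
  simp only
  by_cases hinit : ((PySem.List.pyRange 0 stride 1).map (fun _ => ([] : List Int))) = []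
  · rw [if_pos hinit]
    have : stride.toNat = 0 := by
      have := congrArg List.length hinit
      simp [PySem.List.length_pyRange_one] at this
      omega
    simp [hinit, this]
  · rw [if_neg hinit]
    rw [pv_foldl_const, PySem.List.length_pyRange_one]
    rw [PySem.List.pyRange_one 0 stride]
    simp only [Int.sub_zero, List.map_map]
    have h := pv_outer list stride.toNat pointSize.toNat
    simp only [pvH] at h ⊢
    simp only [Function.comp_def]
    rw [h]

-- ===== VERDICT (by name: the statement is the Claim_ definition above) =====
theorem groupX_spec : Claim_equal_groupX := by
  intro list stride pointSize _ _
  unfold Spec_groupX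
  rw [pv_groupX_eq, pv_groupX_alt_eq]
  rw [PySem.List.pyRange_one 0 stride, PySem.List.pyRange_one 0 pointSize]
  simp only [Int.sub_zero, List.map_map, Function.comp_def, zero_add]
  apply List.map_congr_left
  intro i hi
  apply List.map_congr_left
  intro j _
  have hst : ((stride.toNat : Int)) = stride := by
    have : i < stride.toNat := List.mem_range.mp hi
    omega
  have : (i : Int) + (j : Int) * stride = (↑(j * stride.toNat) : Int) + (i : Int) := by
    push_cast
    rw [hst]
    ring
  rw [this]
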